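-- pv_equiv track=rewrite | github.com/agentcoinorg/fundpublicgoods | workers/fund_public_goods/lib/strategy/utils/get_top_matching_projects.py | get_top_n_unique_ids
-- ===== SOURCE A (Python) =====
-- def get_top_n_unique_ids(data: dict[str, list[str]], n: int) -> list[str]:
--     unique_ids = set()
--     result_ids: list[str] = []
--     query_order = list(data.keys())
--     max_length = max(len(ids) for ids in data.values())
--
--     for i in range(max_length):
--         for query in query_order:
--             if len(result_ids) >= n:
--                 break
--             ids = data[query]
--             if i < len(ids) and ids[i] not in unique_ids:
--                 unique_ids.add(ids[i])
--                 result_ids.append(ids[i])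
--
--         if len(result_ids) >= n:
--             break
--
--     return result_ids
-- ===== SOURCE B (Python) =====
-- def get_top_n_unique_ids(data: dict[str, list[str]], n: int) -> list[str]:
--     # Rank every cell by its row-major position (index*width + column), keep the
--     # minimal rank per id in one pass per list, then sort the ids by that rank.
--     width = len(data)
--     first_pos: dict[str, int] = {}
--     for j, ids in enumerate(data.values()):
--         for i, id_ in enumerate(ids):
--             pos = i * width + j
--             if id_ not in first_pos or pos < first_pos[id_]:
--                 first_pos[id_] = pos
--     ranked = sorted(first_pos, key=first_pos.get)
--     return ranked[:n] if n > 0 else []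
-- ===== Notes on version B (the rewrite author's own statement) =====
-- stated objective: alternative
-- what changed: B abandons A's row-by-row round-robin scan with an early-exit cap: it assigns every cell the scalar rank i*width+j, keeps each id's minimal rank in a dict built in one pass per list, then sorts the ids by rank and slices off the first n.
import Mathlib
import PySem

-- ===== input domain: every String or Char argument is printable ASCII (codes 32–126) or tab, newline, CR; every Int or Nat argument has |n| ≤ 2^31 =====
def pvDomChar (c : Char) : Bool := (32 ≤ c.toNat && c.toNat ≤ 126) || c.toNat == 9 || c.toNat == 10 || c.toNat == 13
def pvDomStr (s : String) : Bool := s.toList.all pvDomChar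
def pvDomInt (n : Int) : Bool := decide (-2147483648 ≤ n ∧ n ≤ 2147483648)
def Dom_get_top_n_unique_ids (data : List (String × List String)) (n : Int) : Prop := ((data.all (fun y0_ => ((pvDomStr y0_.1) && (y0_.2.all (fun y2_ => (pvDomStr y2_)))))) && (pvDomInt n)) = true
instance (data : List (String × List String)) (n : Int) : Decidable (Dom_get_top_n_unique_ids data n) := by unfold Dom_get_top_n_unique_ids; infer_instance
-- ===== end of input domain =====

-- B replaces A's row-by-row round-robin scan with a rank-and-sort algorithm: one pass per
-- list records each id's minimal row-major rank i*width+j in a dict, then the ids are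
-- sorted by that rank and the first n taken; objective: alternative algorithm, same cost.

-- ===== PORT A =====
-- A's nested loop: outer over range(max_length), inner over the dict's keys with a break once
-- len(result) >= n (the break is modelled by the step becoming a no-op, which is exact since
-- the state can no longer change once the cap is hit).
def get_top_n_unique_ids (data : List (String × List String)) (n : Int) : List String :=
  let d := PySem.Dict.ofList data
  let query_order := d.keys
  -- max(len(ids) for ids in data.values()); empty data raises ValueError (excluded by Pre_)
  let max_length := ((d.values.map List.length).foldl Nat.max 0)
  let st := (List.range max_length).foldl
    (fun (st : List String × List String) i =>
      query_order.foldl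
        (fun (st2 : List String × List String) query =>
          if n ≤ (st2.2.length : Int) then st2       -- break
          else
            let ids := d.getD query []
            if i < ids.length ∧ ids.getD i "" ∉ st2.1 then
              (PySem.Set.add st2.1 (ids.getD i ""), st2.2 ++ [ids.getD i ""])
            else st2) st)
    (PySem.Set.empty, [])
  st.2

-- ===== PORT B =====
-- loop body of B's dict-building pass: keep the minimal rank seen for this id
def pvMinStep (fp : PySem.Dict String Int) (p : Int × String) : PySem.Dict String Int :=
  if fp.contains p.2 = false ∨ p.1 < fp.getD p.2 0 then fp.insert p.2 p.1 else fp

def get_top_n_unique_ids_alt (data : List (String × List String)) (n : Int) : List String :=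
  let d := PySem.Dict.ofList data
  let width := d.size
  let first_pos :=
    (PySem.List.enumerate d.values 0).foldl (fun fp ji =>
      (PySem.List.enumerate ji.2 0).foldl (fun fp ii =>
        pvMinStep fp (ii.1 * (width : Int) + ji.1, ii.2)) fp)
      PySem.Dict.empty
  let ranked := PySem.List.sorted first_pos.keys (fun k => first_pos.getD k 0)
  if 0 < n then PySem.List.slice ranked none (some n) else []

-- ===== PRECONDITION & SPEC =====
-- Pre_ excludes only data = []: there A's max() raises ValueError (B would return []).
def Pre_get_top_n_unique_ids (data : List (String × List String)) (n : Int) : Prop := data ≠ []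
instance (data : List (String × List String)) (n : Int) : Decidable (Pre_get_top_n_unique_ids data n) := by unfold Pre_get_top_n_unique_ids; infer_instance

def pvWitness_get_top_n_unique_ids : (List (String × List String)) × Int :=
  ([("a", ["x", "y"]), ("b", ["y", "z"])], 3)

def Spec_get_top_n_unique_ids (data : List (String × List String)) (n : Int) (out : List String) : Prop := out = get_top_n_unique_ids_alt data n
instance (data : List (String × List String)) (n : Int) (out : List String) : Decidable (Spec_get_top_n_unique_ids data n out) := by unfold Spec_get_top_n_unique_ids; infer_instance

-- ===== CLAIM (what is proved, stated in full; the proofs are below) =====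
def Claim_equal_get_top_n_unique_ids : Prop := ∀ (data : List (String × List String)) (n : Int), Dom_get_top_n_unique_ids data n → Pre_get_top_n_unique_ids data n → Spec_get_top_n_unique_ids data n (get_top_n_unique_ids data n)

-- ===== LEMMAS AND PROOFS =====

-- the canonical row-major id stream and its ranked rank lists
def pvS (vs : List (List String)) : List String :=
  (List.range ((vs.map List.length).foldl Nat.max 0)).flatMap
    (fun i => vs.filterMap (fun xs => xs[i]?))

def pvP (vs : List (List String)) : List (Int × String) :=
  (List.range ((vs.map List.length).foldl Nat.max 0)).flatMap
    (fun (i : Nat) => (PySem.List.enumerate vs 0).filterMap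
      (fun ji => (ji.2[i]?).map (fun x => ((i : Int) * (vs.length : Int) + ji.1, x))))

def pvQ (vs : List (List String)) : List (Int × String) :=
  (PySem.List.enumerate vs 0).flatMap (fun ji =>
    (PySem.List.enumerate ji.2 0).map (fun ii => (ii.1 * (vs.length : Int) + ji.1, ii.2)))

def pvRanks (Q : List (Int × String)) (k : String) : List Int :=
  (Q.filter (fun p => p.2 == k)).map (·.1)

def pvCellRank (vs : List (List String)) (k : String) (r : Int) : Prop :=
  ∃ (j : Nat), ∃ (hj : j < vs.length), ∃ (i : Nat), (i : Int) * (vs.length : Int) + (j : Int) = r ∧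
    ∃ (hi : i < vs[j].length), vs[j][i] = k

-- A's inner-step over an Option element, and the plain capped dedup step
def pvCapStep (n : Int) (st : List String × List String) (x : String) : List String × List String :=
  if n ≤ (st.2.length : Int) then st
  else if x ∈ st.1 then st else (PySem.Set.add st.1 x, st.2 ++ [x])

def pvStep (n : Int) (st : List String × List String) (x : Option String) :
    List String × List String :=
  if n ≤ (st.2.length : Int) then st
  else
    match x with
    | none => st
    | some id_ =>
      if id_ ∈ st.1 then st else (PySem.Set.add st.1 id_, st.2 ++ [id_])

-- the fresh ids pvCapStep appends when started from `seen`
def pvNew (seen : List String) : List String → List String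
  | [] => []
  | x :: S => if x ∈ seen then pvNew seen S else x :: pvNew (PySem.Set.add seen x) S



-- ---------- A side: the nested loop is the capped dedup fold over the row-major stream ----------

theorem pvStep_none (n : Int) (st : List String × List String) : pvStep n st none = st := by
  unfold pvStep; split <;> rfl

theorem pvStep_some (n : Int) (st : List String × List String) (v : String) :
    pvStep n st (some v) = pvCapStep n st v := rfl

theorem pvCapFold_capped (n : Int) (S : List String) (st : List String × List String)
    (h : n ≤ (st.2.length : Int)) : S.foldl (pvCapStep n) st = st := by
  induction S with
  | nil => rfl
  | cons x S ih => simp [List.foldl_cons, pvCapStep, h, ih]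

theorem pvSetAdd_of_mem {seen : List String} {x : String} (h : x ∈ seen) :
    PySem.Set.add seen x = seen := by
  simp [PySem.Set.add, PySem.Set.contains, h]

theorem pvSetAdd_of_not_mem {seen : List String} {x : String} (h : x ∉ seen) :
    PySem.Set.add seen x = seen ++ [x] := by
  simp [PySem.Set.add, PySem.Set.contains, h]

theorem pvFoldl_add_eq_append_pvNew (S : List String) : ∀ seen,
    S.foldl PySem.Set.add seen = seen ++ pvNew seen S := by
  induction S with
  | nil => intro seen; simp [pvNew]
  | cons x S ih =>
    intro seen
    by_cases h : x ∈ seen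
    · simp [List.foldl_cons, pvNew, h, pvSetAdd_of_mem h, ih]
    · simp only [List.foldl_cons, pvNew, h, if_neg]
      rw [ih]
      simp [pvSetAdd_of_not_mem h]

theorem pvDedup_eq_pvNew (S : List String) : PySem.List.dedup S = pvNew [] S := by
  have : PySem.List.dedup S = S.foldl PySem.Set.add [] := rfl
  rw [this, pvFoldl_add_eq_append_pvNew]; simp

theorem pvCapFold_snd (n : Int) (S : List String) : ∀ seen res,
    (S.foldl (pvCapStep n) (seen, res)).2 = res ++ (pvNew seen S).take (n.toNat - res.length) := by
  induction S with
  | nil => intro seen res; simp [pvNew]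
  | cons x S ih =>
    intro seen res
    by_cases hc : n ≤ (res.length : Int)
    · rw [pvCapFold_capped n _ _ hc]
      have h0 : n.toNat - res.length = 0 := by omega
      simp [h0]
    · by_cases hm : x ∈ seen
      · simp only [List.foldl_cons, pvCapStep, hc, if_neg, if_pos, hm, ite_true, ite_false]
        simpa [pvNew, hm] using ih seen res
      · simp only [List.foldl_cons, pvCapStep, hc, hm, ite_false, if_neg, not_false_iff]
        rw [ih]
        have hk : n.toNat - res.length = (n.toNat - (res ++ [x]).length) + 1 := by
          simp only [List.length_append, List.length_cons, List.length_nil]; omega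
        simp only [pvNew, hm, ite_false, hk, List.take_succ_cons, if_neg, not_false_iff]
        simp

theorem pvFoldl_step_filterMap (n : Int) (row : List (Option String)) :
    ∀ st, row.foldl (pvStep n) st = (row.filterMap id).foldl (pvCapStep n) st := by
  induction row with
  | nil => intro st; rfl
  | cons x row ih =>
    intro st
    cases x with
    | none => simp [List.foldl_cons, pvStep_none, List.filterMap_cons, ih]
    | some v => simp [List.foldl_cons, pvStep_some, List.filterMap_cons, ih]

theorem pvStepA_eq (n : Int) (i : Nat) (st : List String × List String) (ids : List String) :
    (if n ≤ (st.2.length : Int) then st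
     else if i < ids.length ∧ ids.getD i "" ∉ st.1 then
       (PySem.Set.add st.1 (ids.getD i ""), st.2 ++ [ids.getD i ""])
     else st) = pvStep n st ids[i]? := by
  by_cases hc : n ≤ (st.2.length : Int)
  · simp [pvStep, hc]
  · by_cases hi : i < ids.length
    · have hg : ids[i]? = some ids[i] := List.getElem?_eq_getElem hi
      have hd : ids.getD i "" = ids[i] := List.getD_eq_getElem ids "" hi
      by_cases hm : ids[i] ∈ st.1
      · simp [pvStep, hc, hi, hm]
      · simp [pvStep, hc, hi, hm]
    · have hg : ids[i]? = none := List.getElem?_eq_none (by omega)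
      simp [pvStep, hc, hi]

theorem pvRowA_eq (n : Int) (d : PySem.Dict String (List String)) (hnd : d.keys.Nodup) (i : Nat)
    (st : List String × List String) :
    d.keys.foldl
      (fun (st2 : List String × List String) query =>
        if n ≤ (st2.2.length : Int) then st2
        else
          let ids := d.getD query []
          if i < ids.length ∧ ids.getD i "" ∉ st2.1 then
            (PySem.Set.add st2.1 (ids.getD i ""), st2.2 ++ [ids.getD i ""])
          else st2) st
    = (d.values.map (fun xs => xs[i]?)).foldl (pvStep n) st := by
  rw [PySem.Dict.values_eq_map_keys d hnd []]
  rw [List.map_map, List.foldl_map]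
  refine PySem.List.foldl_congr_mem _ _ _ _ (fun st2 q _ => ?_)
  simpa using pvStepA_eq n i st2 (d.getD q [])

theorem pvA_eq (data : List (String × List String)) (n : Int) :
    get_top_n_unique_ids data n
      = (PySem.List.dedup (pvS (PySem.Dict.ofList data).values)).take n.toNat := by
  have hnd := PySem.Dict.nodup_keys_ofList data
  unfold get_top_n_unique_ids
  simp only []
  rw [PySem.List.foldl_congr_mem _ _ _ _
    (fun st i _ => pvRowA_eq n (PySem.Dict.ofList data) hnd i st)]
  rw [PySem.List.foldl_congr_mem _ _ _ _ (fun (st : List String × List String) (i : Nat) _ => by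
    rw [pvFoldl_step_filterMap, List.filterMap_map])]
  rw [← List.foldl_flatMap]
  simp only [Function.id_comp]
  have : (PySem.Set.empty, ([] : List String)) = (([] : List String), ([] : List String)) := rfl
  rw [this]
  rw [show ((List.range (((PySem.Dict.ofList data).values.map List.length).foldl Nat.max 0)).flatMap
      (fun i => (PySem.Dict.ofList data).values.filterMap (fun xs => xs[i]?)))
      = pvS (PySem.Dict.ofList data).values from rfl]
  rw [pvCapFold_snd]
  rw [← pvDedup_eq_pvNew]
  simp

-- ---------- min? helpers ----------

theorem pvMin?_congr (l l' : List Int) (h : ∀ x, x ∈ l ↔ x ∈ l') : l.min? = l'.min? := by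
  cases hm : l.min? with
  | none =>
    rw [List.min?_eq_none_iff] at hm
    subst hm
    have : l' = [] := by
      apply List.eq_nil_iff_forall_not_mem.mpr
      intro a ha; exact (by simpa using (h a).mpr ha)
    simp [this]
  | some m =>
    rw [List.min?_eq_some_iff_subtype] at hm
    obtain ⟨hmem, hall⟩ := hm
    symm
    rw [List.min?_eq_some_iff_subtype]
    exact ⟨(h m).mp hmem, fun x hx => hall x ((h x).mpr hx)⟩

theorem pvMin?_cons_extra (a b : Int) (l : List Int) (h : a ≤ b) :
    (b :: a :: l).min? = (a :: l).min? := by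
  cases hm : (a :: l).min? with
  | none => rw [List.min?_eq_none_iff] at hm; cases hm
  | some m =>
    rw [List.min?_eq_some_iff_subtype] at hm
    obtain ⟨hmem, hall⟩ := hm
    rw [List.min?_eq_some_iff_subtype]
    refine ⟨List.mem_cons_of_mem _ hmem, fun x hx => ?_⟩
    rcases List.mem_cons.mp hx with rfl | hx'
    · exact le_trans (hall a (List.mem_cons_self ..)) h
    · exact hall x hx'

theorem pvMin?_append_singleton_of_le (l : List Int) (r : Int) (hne : l ≠ [])
    (h : ∀ x ∈ l, x ≤ r) : (l ++ [r]).min? = l.min? := by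
  cases hm : l.min? with
  | none => rw [List.min?_eq_none_iff] at hm; exact absurd hm hne
  | some m =>
    rw [List.min?_eq_some_iff_subtype] at hm
    obtain ⟨hmem, hall⟩ := hm
    rw [List.min?_eq_some_iff_subtype]
    refine ⟨List.mem_append_left _ hmem, fun x hx => ?_⟩
    rcases List.mem_append.mp hx with hx' | hx'
    · exact hall x hx'
    · simp at hx'; subst hx'; exact le_trans (hall m hmem) (h m hmem)

-- ---------- B side: the min-rank dict ----------

theorem pvMinFold_get? (Q : List (Int × String)) : ∀ (fp : PySem.Dict String Int) (k : String),
    (Q.foldl pvMinStep fp).get? k = ((fp.get? k).toList ++ pvRanks Q k).min? := by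
  induction Q with
  | nil => intro fp k; cases h : fp.get? k <;> simp [pvRanks, h]
  | cons p Q ih =>
    intro fp k
    rw [List.foldl_cons, ih]
    by_cases hpk : p.2 = k
    · subst hpk
      have hranks : pvRanks (p :: Q) p.2 = p.1 :: pvRanks Q p.2 := by
        simp [pvRanks, List.filter_cons]
      rw [hranks]
      by_cases h1 : fp.contains p.2 = false
      · have hn : fp.get? p.2 = none := (PySem.Dict.get?_eq_none_iff_contains fp p.2).mpr h1
        have hstep : pvMinStep fp p = fp.insert p.2 p.1 := by
          unfold pvMinStep; rw [if_pos (Or.inl h1)]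
        rw [hstep, PySem.Dict.get?_insert_self, hn]
        rfl
      · have hct : fp.contains p.2 = true := by revert h1; cases fp.contains p.2 <;> simp
        obtain ⟨cur, hcur⟩ : ∃ cur, fp.get? p.2 = some cur := by
          cases hg : fp.get? p.2 with
          | none => rw [(PySem.Dict.get?_eq_none_iff_contains fp p.2).mp hg] at hct; cases hct
          | some c => exact ⟨c, rfl⟩
        have hgetD : fp.getD p.2 0 = cur := by
          rw [PySem.Dict.getD_eq_get?_getD, hcur]; rfl
        by_cases h2 : p.1 < cur
        · have hstep : pvMinStep fp p = fp.insert p.2 p.1 := by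
            unfold pvMinStep; rw [if_pos (Or.inr (by rw [hgetD]; exact h2))]
          rw [hstep, PySem.Dict.get?_insert_self, hcur]
          exact (pvMin?_cons_extra p.1 cur _ (le_of_lt h2)).symm
        · have hstep : pvMinStep fp p = fp := by
            unfold pvMinStep
            have hcond : ¬ (fp.contains p.2 = false ∨ p.1 < fp.getD p.2 0) := by
              rw [hgetD]; push_neg; exact ⟨by simp [hct], not_lt.mp h2⟩
            rw [if_neg hcond]
          rw [hstep, hcur]
          have hswap : (cur :: p.1 :: pvRanks Q p.2).min? = (p.1 :: cur :: pvRanks Q p.2).min? :=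
            pvMin?_congr _ _ (by intro x; simp; tauto)
          rw [show (((some cur).toList ++ pvRanks Q p.2).min?) = (cur :: pvRanks Q p.2).min? from rfl]
          rw [show (((some cur).toList ++ p.1 :: pvRanks Q p.2).min?) = (cur :: p.1 :: pvRanks Q p.2).min? from rfl]
          rw [hswap, pvMin?_cons_extra cur p.1 _ (not_lt.mp h2)]
    · have hranks : pvRanks (p :: Q) k = pvRanks Q k := by
        simp [pvRanks, List.filter_cons, hpk]
      have hstep : (pvMinStep fp p).get? k = fp.get? k := by
        unfold pvMinStep
        split
        · exact PySem.Dict.get?_insert_of_ne _ _ (fun h => hpk h.symm)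
        · rfl
      rw [hranks, hstep]

theorem pvMinFold_nodup (Q : List (Int × String)) : ∀ (fp : PySem.Dict String Int),
    fp.keys.Nodup → (Q.foldl pvMinStep fp).keys.Nodup := by
  induction Q with
  | nil => intro fp h; exact h
  | cons p Q ih =>
    intro fp h
    rw [List.foldl_cons]
    apply ih
    unfold pvMinStep
    split
    · exact PySem.Dict.nodup_keys_insert _ _ _ h
    · exact h

-- ---------- cells ----------

theorem pvLength_le_max (vs : List (List String)) {j : Nat} (hj : j < vs.length) :
    vs[j].length ≤ (vs.map List.length).foldl Nat.max 0 := by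
  exact (PySem.List.le_foldl_max (vs.map List.length) 0).2 _ (List.mem_map_of_mem (vs.getElem_mem hj))

theorem mem_pvRanksQ (vs : List (List String)) (k : String) (r : Int) :
    r ∈ pvRanks (pvQ vs) k ↔ pvCellRank vs k r := by
  unfold pvRanks pvQ pvCellRank
  simp [List.mem_filter, List.mem_flatMap, PySem.List.mem_enumerate_iff]

theorem mem_pvRanksP (vs : List (List String)) (k : String) (r : Int) :
    r ∈ pvRanks (pvP vs) k ↔ pvCellRank vs k r := by
  unfold pvRanks pvP pvCellRank
  simp [List.mem_filter, List.mem_flatMap, List.mem_filterMap, PySem.List.mem_enumerate_iff,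
    List.getElem?_eq_some_iff]
  constructor
  · rintro ⟨i, j, ⟨him, hr⟩, hj, hi, hk⟩
    exact ⟨j, hj, i, hr, hi, hk⟩
  · rintro ⟨j, hj, i, hr, hi, hk⟩
    exact ⟨i, j, ⟨lt_of_lt_of_le hi (pvLength_le_max vs hj), hr⟩, hj, hi, hk⟩

theorem mem_pvS (vs : List (List String)) (x : String) :
    x ∈ pvS vs ↔ ∃ r, pvCellRank vs x r := by
  unfold pvS pvCellRank
  simp only [List.mem_flatMap, List.mem_range, List.mem_filterMap, List.getElem?_eq_some_iff]
  constructor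
  · rintro ⟨i, him, xs, hxs, hi, hk⟩
    obtain ⟨j, hj, rfl⟩ := List.mem_iff_getElem.mp hxs
    exact ⟨(i : Int) * (vs.length : Int) + (j : Int), j, hj, i, rfl, hi, hk⟩
  · rintro ⟨r, j, hj, i, hr, hi, hk⟩
    exact ⟨i, lt_of_lt_of_le hi (pvLength_le_max vs hj), vs[j], vs.getElem_mem hj, hi, hk⟩

theorem map_snd_pvP (vs : List (List String)) : (pvP vs).map (·.2) = pvS vs := by
  unfold pvP pvS
  rw [List.map_flatMap]
  congr 1
  funext i
  rw [List.map_filterMap]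
  simp only [Option.map_map]
  have : ((fun (p : Int × String) => p.2) ∘ (fun x => ((i : Int) * (vs.length : Int) + ·, x) 0)) = id := by
    funext x; rfl
  conv_rhs => rw [← PySem.List.map_snd_enumerate vs 0, List.filterMap_map]
  congr 1
  funext ji
  simp [Function.comp]

theorem pvP_pairwise (vs : List (List String)) :
    (pvP vs).Pairwise (fun p q => p.1 < q.1) := by
  unfold pvP
  generalize ((vs.map List.length).foldl Nat.max 0) = m
  induction m with
  | zero => simp
  | succ m ih =>
    rw [List.range_succ, List.flatMap_append]
    refine List.pairwise_append.mpr ⟨ih, ?_, ?_⟩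
    · simp only [List.flatMap_cons, List.flatMap_nil, List.append_nil]
      refine List.pairwise_filterMap.mpr ?_
      refine (PySem.List.pairwise_lt_enumerate vs 0).imp ?_
      rintro ⟨j, xs⟩ ⟨j', xs'⟩ hlt b hb b' hb'
      rw [Option.map_eq_some_iff] at hb hb'
      obtain ⟨x, -, rfl⟩ := hb
      obtain ⟨x', -, rfl⟩ := hb'
      simpa using hlt
    · intro a ha b hb
      simp only [List.mem_flatMap, List.mem_range] at ha
      obtain ⟨i, him, hrow⟩ := ha
      simp only [List.flatMap_cons, List.flatMap_nil, List.append_nil] at hb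
      simp only [List.mem_filterMap, PySem.List.mem_enumerate_iff] at hrow hb
      obtain ⟨ji, ⟨j, hj, rfl⟩, hmap⟩ := hrow
      obtain ⟨ji', ⟨j', hj', rfl⟩, hmap'⟩ := hb
      rw [Option.map_eq_some_iff] at hmap hmap'
      obtain ⟨x, -, rfl⟩ := hmap
      obtain ⟨x', -, rfl⟩ := hmap'
      simp only [zero_add]
      have hnat : i * vs.length + j < m * vs.length + j' :=
        calc i * vs.length + j < i * vs.length + vs.length := by omega
          _ = (i + 1) * vs.length := by ring
          _ ≤ m * vs.length := Nat.mul_le_mul_right _ (by omega)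
          _ ≤ m * vs.length + j' := Nat.le_add_right _ _
      push_cast
      exact_mod_cast hnat

-- ---------- dedup ordered by first (= minimal) rank ----------

theorem pvRanks_append (P : List (Int × String)) (p : Int × String) (k : String) :
    pvRanks (P ++ [p]) k = pvRanks P k ++ (if p.2 = k then [p.1] else []) := by
  unfold pvRanks
  rw [List.filter_append, List.map_append]
  by_cases h : p.2 = k <;> simp [List.filter_cons, h]

theorem pvRanks_eq_nil_iff (P : List (Int × String)) (k : String) :
    pvRanks P k = [] ↔ k ∉ P.map (·.2) := by
  unfold pvRanks
  simp [List.filter_eq_nil_iff, List.mem_map]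
  constructor
  · intro h a ha
    exact h a k ha rfl
  · intro h a b hab hbk
    subst hbk
    exact h a hab

theorem pvDedup_append_singleton (S : List String) (x : String) :
    PySem.List.dedup (S ++ [x])
      = PySem.List.dedup S ++ (if x ∈ S then [] else [x]) := by
  have h1 : PySem.List.dedup (S ++ [x]) = (S ++ [x]).foldl PySem.Set.add [] := rfl
  have h2 : PySem.List.dedup S = S.foldl PySem.Set.add [] := rfl
  rw [h1, List.foldl_append, ← h2]
  by_cases h : x ∈ S
  · rw [show ([x].foldl PySem.Set.add (PySem.List.dedup S)) = PySem.Set.add (PySem.List.dedup S) x from rfl]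
    rw [pvSetAdd_of_mem ((PySem.List.mem_dedup ..).mpr h)]
    simp [h]
  · rw [show ([x].foldl PySem.Set.add (PySem.List.dedup S)) = PySem.Set.add (PySem.List.dedup S) x from rfl]
    rw [pvSetAdd_of_not_mem (fun hc => h ((PySem.List.mem_dedup ..).mp hc))]
    simp [h]

theorem pvDedupPairwise (P : List (Int × String)) (h : P.Pairwise (fun p q => p.1 < q.1)) :
    (PySem.List.dedup (P.map (·.2))).Pairwise
      (fun a b => ((pvRanks P a).min?).getD 0 < ((pvRanks P b).min?).getD 0) := by
  revert h
  induction P using List.reverseRecOn with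
  | nil => intro h; simp
  | append_singleton P p ih =>
    intro h
    rw [List.pairwise_append] at h
    obtain ⟨hP, -, hcross0⟩ := h
    have hcross : ∀ a ∈ P, a.1 < p.1 := fun a ha => hcross0 a ha p (List.mem_singleton_self p)
    have hsame : ∀ k ∈ P.map (·.2),
        ((pvRanks (P ++ [p]) k).min?).getD 0 = ((pvRanks P k).min?).getD 0 := by
      intro k hk
      rw [pvRanks_append]
      by_cases hpk : p.2 = k
      · rw [if_pos hpk]
        rw [pvMin?_append_singleton_of_le]
        · rw [Ne, pvRanks_eq_nil_iff]; simpa using hk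
        · intro x hx
          simp only [pvRanks, List.mem_map, List.mem_filter] at hx
          obtain ⟨a, ⟨haP, -⟩, rfl⟩ := hx
          exact le_of_lt (hcross a haP)
      · rw [if_neg hpk]; simp
    rw [List.map_append]
    simp only [List.map_cons, List.map_nil]
    rw [pvDedup_append_singleton]
    by_cases hmem : p.2 ∈ P.map (·.2)
    · rw [if_pos hmem, List.append_nil]
      refine (ih hP).imp_of_mem ?_
      intro a b ha hb hlt
      rw [hsame a ((PySem.List.mem_dedup ..).mp ha), hsame b ((PySem.List.mem_dedup ..).mp hb)]
      exact hlt
    · rw [if_neg hmem]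
      refine List.pairwise_append.mpr ⟨?_, List.pairwise_singleton _ _, ?_⟩
      · refine (ih hP).imp_of_mem ?_
        intro a b ha hb hlt
        rw [hsame a ((PySem.List.mem_dedup ..).mp ha), hsame b ((PySem.List.mem_dedup ..).mp hb)]
        exact hlt
      · intro a ha b hb
        rw [List.mem_singleton] at hb
        subst hb
        have haS : a ∈ P.map (·.2) := (PySem.List.mem_dedup ..).mp ha
        have hFp : ((pvRanks (P ++ [p]) p.2).min?).getD 0 = p.1 := by
          rw [pvRanks_append, if_pos rfl, (pvRanks_eq_nil_iff P p.2).mpr hmem]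
          rfl
        rw [hFp, hsame a haS]
        have hne : pvRanks P a ≠ [] := by rw [Ne, pvRanks_eq_nil_iff]; simpa using haS
        obtain ⟨m, hm⟩ : ∃ m, (pvRanks P a).min? = some m := by
          cases hmm : (pvRanks P a).min? with
          | none => exact absurd ((List.min?_eq_none_iff).mp hmm) hne
          | some m => exact ⟨m, rfl⟩
        obtain ⟨hmmem, -⟩ := (List.min?_eq_some_iff_subtype).mp hm
        simp only [pvRanks, List.mem_map, List.mem_filter] at hmmem
        obtain ⟨a', ⟨ha'P, -⟩, rfl⟩ := hmmem
        rw [hm]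
        exact hcross a' ha'P


-- ---------- assembling B ----------

theorem pvSize_eq_values_length (d : PySem.Dict String (List String)) :
    d.size = d.values.length := by
  simp [PySem.Dict.size, PySem.Dict.values]

theorem pvB_fold_eq (vs : List (List String)) :
    ((PySem.List.enumerate vs 0).foldl (fun fp ji =>
        (PySem.List.enumerate ji.2 0).foldl (fun fp ii =>
          pvMinStep fp (ii.1 * (vs.length : Int) + ji.1, ii.2)) fp)
      PySem.Dict.empty)
    = (pvQ vs).foldl pvMinStep PySem.Dict.empty := by
  unfold pvQ
  rw [List.foldl_flatMap]
  refine PySem.List.foldl_congr_mem _ _ _ _ (fun fp ji _ => ?_)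
  rw [List.foldl_map]

theorem pvD_get? (vs : List (List String)) (k : String) :
    (((pvQ vs).foldl pvMinStep PySem.Dict.empty).get? k) = (pvRanks (pvQ vs) k).min? := by
  rw [pvMinFold_get?]
  simp [PySem.Dict.get?_empty]

theorem pvRanked_eq (vs : List (List String)) :
    PySem.List.sorted ((pvQ vs).foldl pvMinStep PySem.Dict.empty).keys
        (fun k => ((pvQ vs).foldl pvMinStep PySem.Dict.empty).getD k 0)
      = PySem.List.dedup (pvS vs) := by
  have hPQ : ∀ k, (pvRanks (pvP vs) k).min? = (pvRanks (pvQ vs) k).min? :=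
    fun k => pvMin?_congr _ _ (fun r => (mem_pvRanksP vs k r).trans (mem_pvRanksQ vs k r).symm)
  apply PySem.List.sorted_eq_of_perm_of_pairwise_lt
  · rw [List.perm_ext_iff_of_nodup (PySem.List.nodup_dedup _)
      (pvMinFold_nodup _ _ (by simp [PySem.Dict.keys_empty]))]
    intro x
    rw [PySem.List.mem_dedup, mem_pvS]
    constructor
    · rintro ⟨r, hcell⟩
      by_contra hx
      have := (PySem.Dict.get?_eq_none_iff_not_mem_keys _ x).mpr hx
      rw [pvD_get?, List.min?_eq_none_iff] at this
      have hmem := (mem_pvRanksQ vs x r).mpr hcell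
      rw [this] at hmem
      exact absurd hmem (by simp)
    · intro hx
      have hne : ((pvQ vs).foldl pvMinStep PySem.Dict.empty).get? x ≠ none := by
        rw [Ne, PySem.Dict.get?_eq_none_iff_not_mem_keys]
        simpa using hx
      rw [pvD_get?, Ne, List.min?_eq_none_iff] at hne
      obtain ⟨r, hr⟩ := List.exists_mem_of_ne_nil _ hne
      exact ⟨r, (mem_pvRanksQ vs x r).mp hr⟩
  · have hp := pvDedupPairwise (pvP vs) (pvP_pairwise vs)
    rw [map_snd_pvP] at hp
    refine hp.imp ?_
    intro a b hlt
    rw [PySem.Dict.getD_eq_get?_getD, PySem.Dict.getD_eq_get?_getD, pvD_get?, pvD_get?,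
      ← hPQ a, ← hPQ b]
    simpa using hlt

theorem pvB_eq (data : List (String × List String)) (n : Int) :
    get_top_n_unique_ids_alt data n
      = (if 0 < n
          then PySem.List.slice (PySem.List.dedup (pvS (PySem.Dict.ofList data).values)) none (some n)
          else []) := by
  unfold get_top_n_unique_ids_alt
  simp only [pvSize_eq_values_length]
  rw [pvB_fold_eq, pvRanked_eq]

-- ===== VERDICT (by name: the statement is the Claim_ definition above) =====
theorem get_top_n_unique_ids_spec : Claim_equal_get_top_n_unique_ids := by
  unfold Claim_equal_get_top_n_unique_ids
  intro data n _ _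
  unfold Spec_get_top_n_unique_ids
  rw [pvA_eq, pvB_eq]
  by_cases hn : 0 < n
  · rw [if_pos hn, PySem.List.slice_to _ (le_of_lt hn)]
  · rw [if_neg hn]
    have h0 : n.toNat = 0 := by omega
    rw [h0, List.take_zero]
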